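-- pv_equiv track=rewrite | github.com/marybazo/codewars | sum_by_factors.py | sum_for_list_best
-- ===== SOURCE A (Python) =====
-- from collections import defaultdict
--
-- def sum_for_list_best(lst):
--
--     def factors(x):
--         p_facs = []
--         i = 2
--         while x > 1 or x < -1:
--             if x % i == 0:
--                 p_facs.append(i)
--                 x //= i
--             else:
--                 i += 1
--         return list(set(p_facs))
--
--     fac_dict = defaultdict(int)
--
--     for i in lst:
--         for fac in factors(i):
--             fac_dict[fac] += i
--
--     return sorted([[k,v] for k,v in fac_dict.items()])
-- ===== SOURCE B (Python) =====
-- def sum_for_list_best(lst):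
--     # B: sqrt-bounded factorization to collect the set of primes in one pass,
--     # then one whole-list divisibility scan per prime, in sorted prime order.
--     def prime_factors(x):
--         n = abs(x)
--         fs = []
--         d = 2
--         while d * d <= n:
--             if n % d == 0:
--                 fs.append(d)
--                 while n % d == 0:
--                     n //= d
--             else:
--                 d += 1
--         if n > 1:
--             fs.append(n)
--         return fs
--
--     primes = set()
--     for x in lst:
--         primes.update(prime_factors(x))
--     return [[p, sum(x for x in lst if x % p == 0)] for p in sorted(primes)]
-- ===== Notes on version B (the rewrite author's own statement) =====
-- stated objective: faster
-- what changed: Replaces the single accumulating defaultdict pass (with unbounded trial division up to the largest prime factor) by a sqrt-bounded factorization that first collects the set of distinct primes, then one whole-list divisibility rescan per prime in sorted order.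
import Mathlib
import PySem

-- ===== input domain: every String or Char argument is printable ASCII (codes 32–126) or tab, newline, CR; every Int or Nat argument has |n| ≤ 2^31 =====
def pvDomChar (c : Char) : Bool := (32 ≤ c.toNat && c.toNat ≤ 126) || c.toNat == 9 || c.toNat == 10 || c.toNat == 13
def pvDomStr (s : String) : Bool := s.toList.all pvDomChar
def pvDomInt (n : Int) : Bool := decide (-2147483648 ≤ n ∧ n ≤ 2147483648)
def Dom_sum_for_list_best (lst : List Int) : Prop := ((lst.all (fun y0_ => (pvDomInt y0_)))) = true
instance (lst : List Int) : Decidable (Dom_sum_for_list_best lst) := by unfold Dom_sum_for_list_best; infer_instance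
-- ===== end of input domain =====

-- B replaces A's single accumulating defaultdict pass (trial division up to the largest
-- prime factor) by a sqrt-bounded prime collection followed by one divisibility rescan of
-- the list per prime, in sorted prime order (objective: faster).

-- ===== PORT A =====
-- A's `while x > 1 or x < -1` trial-division loop, with a fuel counter as a pure totality
-- guard: 2*|x| steps provably suffice from the reachable start i = 2 (see pvFacLoop_mem).
def pvFacLoop (fuel : Nat) (x i : Int) (p_facs : List Int) : List Int :=
  match fuel with
  | 0 => p_facs
  | fuel + 1 =>
    if x > 1 ∨ x < -1 then
      if PySem.Int.mod x i == 0 then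
        pvFacLoop fuel (PySem.Int.floordiv x i) i (p_facs ++ [i])
      else
        pvFacLoop fuel x (i + 1) p_facs
    else p_facs

-- A's `factors`: run the loop from i = 2, then `list(set(p_facs))` (the final result of
-- sum_for_list_best is sorted, so it does not depend on CPython's set iteration order).
def pvFactors (x : Int) : List Int :=
  PySem.Set.ofList (pvFacLoop (2 * x.natAbs) x 2 [])

def sum_for_list_best (lst : List Int) : List (List Int) :=
  PySem.List.sorted
    ((lst.foldl (fun d i => (pvFactors i).foldl (fun d fac => d.modify fac 0 (· + i)) d)
        PySem.Dict.empty).items.map (fun kv => [kv.1, kv.2]))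
    (fun l => l) false

-- ===== PORT B =====
-- B's inner `while n % d == 0: n //= d` (the `2 ≤ d ∧ 0 < n` part of the guard is for
-- totality only: it always holds at the call sites).
def pvStrip (n d : Nat) : Nat :=
  if h : 2 ≤ d ∧ 0 < n ∧ n % d = 0 then pvStrip (n / d) d else n
termination_by n
decreasing_by exact Nat.div_lt_self h.2.1 (by omega)

theorem pvStrip_le (n d : Nat) : pvStrip n d ≤ n := by
  induction n using Nat.strong_induction_on with
  | _ n ih =>
    rw [pvStrip]
    split
    · next h =>
      exact le_trans (ih _ (Nat.div_lt_self h.2.1 (by omega)))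
        (Nat.le_of_lt (Nat.div_lt_self h.2.1 (by omega)))
    · exact le_refl n

-- B's outer factorization loop on n = |x|: `while d*d <= n: …` then `if n > 1: fs.append(n)`
-- (the `2 ≤ d` part of the inner test is a totality guard, always true at call sites).
def pvPfGo (n d : Nat) (fs : List Nat) : List Nat :=
  if hdd : d * d ≤ n then
    if h : 2 ≤ d ∧ n % d = 0 then pvPfGo (pvStrip n d) d (fs ++ [d])
    else pvPfGo n (d + 1) fs
  else if 1 < n then fs ++ [n] else fs
termination_by (n, n + 1 - d)
decreasing_by
  · apply Prod.Lex.left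
    have h0 : 0 < n := by nlinarith [h.1]
    have hs : pvStrip n d = pvStrip (n / d) d := by rw [pvStrip]; simp [h.1, h0, h.2]
    calc pvStrip n d = pvStrip (n / d) d := hs
      _ ≤ n / d := pvStrip_le _ _
      _ < n := Nat.div_lt_self h0 (by omega)
  · apply Prod.Lex.right
    rcases Nat.eq_zero_or_pos d with h0 | h0
    · omega
    · have : d ≤ d * d := Nat.le_mul_of_pos_left d h0
      omega

def pvPrimeFactors (x : Int) : List Int :=
  (pvPfGo x.natAbs 2 []).map (fun m : Nat => (m : Int))

def sum_for_list_best_alt (lst : List Int) : List (List Int) :=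
  (PySem.List.sorted
      (lst.foldl (fun s x => PySem.Set.update s (pvPrimeFactors x)) PySem.Set.empty)
      (fun p => p) false).map
    (fun p => [p, (lst.filter (fun x => PySem.Int.mod x p == 0)).sum])

-- ===== PRECONDITION & SPEC =====
def Spec_sum_for_list_best (lst : List Int) (out : List (List Int)) : Prop := out = sum_for_list_best_alt lst
instance (lst : List Int) (out : List (List Int)) : Decidable (Spec_sum_for_list_best lst out) := by unfold Spec_sum_for_list_best; infer_instance

-- ===== CLAIM (what is proved, stated in full; the proofs are below) =====
def Claim_equal_sum_for_list_best : Prop := ∀ (lst : List Int), Dom_sum_for_list_best lst → Spec_sum_for_list_best lst (sum_for_list_best lst)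

-- ===== LEMMAS AND PROOFS =====

-- casting divisibility: (m : Int) divides x iff m divides |x|
theorem pvCastDvd (m : Nat) (x : Int) : (m : Int) ∣ x ↔ m ∣ x.natAbs :=
  ⟨fun h => Int.natCast_dvd_natCast.mp (Int.dvd_natAbs.mpr h),
   fun h => dvd_trans (Int.natCast_dvd_natCast.mpr h) (Int.natAbs_dvd.mpr dvd_rfl)⟩

-- under A's loop invariant, the trial divisor i stays ≤ |x|
theorem pvSmall (x i : Int) (h2 : 2 ≤ i)
    (hinv : ∀ j : Int, 2 ≤ j → j < i → ¬ j ∣ x) (hx : 2 ≤ x.natAbs) :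
    i.natAbs ≤ x.natAbs := by
  by_contra hlt
  have hne1 : x.natAbs ≠ 1 := by omega
  have hq : x.natAbs.minFac.Prime := Nat.minFac_prime hne1
  have hqd : x.natAbs.minFac ∣ x.natAbs := Nat.minFac_dvd _
  have hql : x.natAbs.minFac ≤ x.natAbs := Nat.minFac_le (by omega)
  have h2q : 2 ≤ x.natAbs.minFac := hq.two_le
  exact hinv (x.natAbs.minFac : Int) (by exact_mod_cast h2q) (by omega)
    ((pvCastDvd _ _).mpr hqd)

-- a trial divisor that divides x, with no smaller divisor, is prime
theorem pvPrimeOfInv (x i : Int) (h2 : 2 ≤ i)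
    (hinv : ∀ j : Int, 2 ≤ j → j < i → ¬ j ∣ x) (hdvd : i ∣ x) : i.natAbs.Prime := by
  rw [Nat.prime_def_lt]
  refine ⟨by omega, fun m hm hmd => ?_⟩
  by_contra hm1
  have hm0 : m ≠ 0 := by
    rintro rfl
    have : i.natAbs = 0 := Nat.eq_zero_of_zero_dvd hmd
    omega
  have hmi : (m : Int) ∣ i := by
    have := Int.natCast_dvd_natCast.mpr hmd
    exact dvd_trans this (Int.natAbs_dvd.mpr dvd_rfl)
  exact hinv (m : Int) (by omega) (by omega) (dvd_trans hmi hdvd)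

-- membership in A's trial-division loop result
theorem pvFacLoop_mem (fuel : Nat) : ∀ (x i : Int) (acc : List Int), 2 ≤ i →
    (∀ j : Int, 2 ≤ j → j < i → ¬ j ∣ x) → 2 * x.natAbs ≤ fuel + i.natAbs →
    ∀ q, q ∈ pvFacLoop fuel x i acc ↔
      q ∈ acc ∨ (0 ≤ q ∧ q.natAbs ∈ x.natAbs.primeFactors) := by
  induction fuel with
  | zero =>
    intro x i acc h2 hinv hfuel q
    by_cases hx : x > 1 ∨ x < -1
    · exfalso
      have := pvSmall x i h2 hinv (by omega)
      omega
    · have hle : x.natAbs = 0 ∨ x.natAbs = 1 := by omega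
      simp only [pvFacLoop]
      rcases hle with h | h <;>
        simp [h, Nat.primeFactors_zero, Nat.primeFactors_one]
  | succ fuel ih =>
    intro x i acc h2 hinv hfuel q
    by_cases hx : x > 1 ∨ x < -1
    · rw [pvFacLoop, if_pos hx]
      by_cases hc : PySem.Int.mod x i = 0
      · have hdvd : i ∣ x := (PySem.Int.mod_eq_zero_iff_dvd x i).mp hc
        rw [if_pos (by simp [hc])]
        have hx2 : 2 ≤ x.natAbs := by omega
        have hxeq : PySem.Int.floordiv x i * i = x := by
          have := PySem.Int.floordiv_mul_add_mod x i
          omega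
        have hprime : i.natAbs.Prime := pvPrimeOfInv x i h2 hinv hdvd
        have hna : x.natAbs = (PySem.Int.floordiv x i).natAbs * i.natAbs := by
          rw [← Int.natAbs_mul, hxeq]
        have hx'0 : (PySem.Int.floordiv x i).natAbs ≠ 0 := by
          intro h0; rw [h0] at hna; omega
        have hpf : x.natAbs.primeFactors =
            (PySem.Int.floordiv x i).natAbs.primeFactors ∪ {i.natAbs} := by
          rw [hna, Nat.primeFactors_mul hx'0 (by omega), hprime.primeFactors]
        have hinv' : ∀ j : Int, 2 ≤ j → j < i → ¬ j ∣ PySem.Int.floordiv x i := by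
          intro j hj2 hji hjd
          exact hinv j hj2 hji (dvd_trans hjd ⟨i, hxeq.symm⟩)
        have hfuel' : 2 * (PySem.Int.floordiv x i).natAbs ≤ fuel + i.natAbs := by
          have h1 : (PySem.Int.floordiv x i).natAbs * 2 ≤
              (PySem.Int.floordiv x i).natAbs * i.natAbs :=
            Nat.mul_le_mul_left _ (by omega)
          omega
        rw [ih _ _ _ h2 hinv' hfuel' q]
        simp only [List.mem_append, List.mem_singleton, hpf, Finset.mem_union,
          Finset.mem_singleton]
        constructor
        · rintro ((hq | rfl) | ⟨hq0, hq1⟩)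
          · exact Or.inl hq
          · exact Or.inr ⟨by omega, Or.inr rfl⟩
          · exact Or.inr ⟨hq0, Or.inl hq1⟩
        · rintro (hq | ⟨hq0, hq1 | hq1⟩)
          · exact Or.inl (Or.inl hq)
          · exact Or.inr ⟨hq0, hq1⟩
          · left; right; omega
      · rw [if_neg (by simp [hc])]
        have hinv' : ∀ j : Int, 2 ≤ j → j < i + 1 → ¬ j ∣ x := by
          intro j hj2 hji hjd
          rcases lt_or_eq_of_le (by omega : j ≤ i) with h | h
          · exact hinv j hj2 h hjd
          · subst h; exact hc ((PySem.Int.mod_eq_zero_iff_dvd x j).mpr hjd)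
        exact ih x (i + 1) acc (by omega) hinv' (by omega) q
    · rw [pvFacLoop, if_neg hx]
      have hle : x.natAbs = 0 ∨ x.natAbs = 1 := by omega
      rcases hle with h | h <;>
        simp [h, Nat.primeFactors_zero, Nat.primeFactors_one]
-- B's inner strip loop: result is positive, divides n, is not divisible by d, and keeps
-- exactly the other prime divisors (d a prime)
theorem pvStrip_spec (d : Nat) (hdp : d.Prime) : ∀ n, 0 < n →
    0 < pvStrip n d ∧ pvStrip n d ∣ n ∧ ¬ d ∣ pvStrip n d ∧
      ∀ q, q.Prime → q ≠ d → (q ∣ pvStrip n d ↔ q ∣ n) := by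
  intro n
  induction n using Nat.strong_induction_on with
  | _ n ih =>
    intro hn
    rw [pvStrip]
    split
    · next h =>
      have hdvd : d ∣ n := Nat.dvd_of_mod_eq_zero h.2.2
      have hlt : n / d < n := Nat.div_lt_self hn (by omega)
      have hpos' : 0 < n / d := Nat.div_pos (Nat.le_of_dvd hn hdvd) (by omega)
      obtain ⟨h1, h2, h3, h4⟩ := ih (n / d) hlt hpos'
      refine ⟨h1, h2.trans (Nat.div_dvd_of_dvd hdvd), h3, fun q hq hqd => (h4 q hq hqd).trans ?_⟩
      constructor
      · exact fun hh => hh.trans (Nat.div_dvd_of_dvd hdvd)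
      · intro hh
        have hnd : n = n / d * d := (Nat.div_mul_cancel hdvd).symm
        rcases (Nat.Prime.dvd_mul hq).mp (hnd ▸ hh) with h5 | h5
        · exact h5
        · exact absurd ((Nat.prime_dvd_prime_iff_eq hq hdp).mp h5) hqd
    · next h =>
      have hmod : ¬ d ∣ n := fun hdvd => h ⟨hdp.two_le, hn, Nat.mod_eq_zero_of_dvd hdvd⟩
      exact ⟨hn, dvd_rfl, hmod, fun q _ _ => Iff.rfl⟩

-- membership in B's factorization loop result, by induction on an explicit measure bound
theorem pvPfGo_mem_aux (N : Nat) : ∀ (n d : Nat) (fs : List Nat),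
    n * (n + 2) + (n + 1 - d) ≤ N → 2 ≤ d → 0 < n →
    (∀ j, 2 ≤ j → j < d → ¬ j ∣ n) →
    ∀ q, q ∈ pvPfGo n d fs ↔ q ∈ fs ∨ q ∈ n.primeFactors := by
  induction N with
  | zero =>
    intro n d fs hN h2 hn hinv q
    exfalso
    have := Nat.mul_le_mul (show 1 ≤ n by omega) (show 1 + 2 ≤ n + 2 by omega)
    omega
  | succ N ih =>
    intro n d fs hN h2 hn hinv q
    rw [pvPfGo]
    by_cases hdd : d * d ≤ n
    · rw [dif_pos hdd]
      by_cases hc : n % d = 0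
      · rw [dif_pos ⟨h2, hc⟩]
        have hdvd : d ∣ n := Nat.dvd_of_mod_eq_zero hc
        have hdp : d.Prime := by
          rw [Nat.prime_def_lt]
          refine ⟨h2, fun m hm hmd => ?_⟩
          by_contra hm1
          have hm0 : m ≠ 0 := by
            rintro rfl
            exact absurd (Nat.eq_zero_of_zero_dvd hmd) (by omega)
          exact hinv m (by omega) hm (hmd.trans hdvd)
        obtain ⟨hs1, hs2, hs3, hs4⟩ := pvStrip_spec d hdp n hn
        have hslt : pvStrip n d < n :=
          lt_of_le_of_ne (pvStrip_le n d) (fun hh => hs3 (by rw [hh]; exact hdvd))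
        have hinv' : ∀ j, 2 ≤ j → j < d → ¬ j ∣ pvStrip n d :=
          fun j hj2 hjd hjdvd => hinv j hj2 hjd (hjdvd.trans hs2)
        have hmeas : pvStrip n d * (pvStrip n d + 2) + (pvStrip n d + 1 - d) ≤ N := by
          have e : (pvStrip n d + 1) * (pvStrip n d + 3)
              = pvStrip n d * (pvStrip n d + 2) + (pvStrip n d + 1) + (pvStrip n d + 2) := by
            ring
          have f : (pvStrip n d + 1) * (pvStrip n d + 3) ≤ n * (n + 2) :=
            Nat.mul_le_mul (by omega) (by omega)
          omega
        rw [ih _ _ _ hmeas h2 hs1 hinv' q]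
        simp only [List.mem_append, List.mem_singleton]
        have hdn : d ∈ n.primeFactors := Nat.mem_primeFactors.mpr ⟨hdp, hdvd, by omega⟩
        constructor
        · rintro ((hq | rfl) | hq)
          · exact Or.inl hq
          · exact Or.inr hdn
          · rcases Nat.mem_primeFactors.mp hq with ⟨hqp, hqd, -⟩
            have hqn : q ∣ n := by
              rcases eq_or_ne q d with rfl | hne
              · exact hdvd
              · exact (hs4 q hqp hne).mp hqd
            exact Or.inr (Nat.mem_primeFactors.mpr ⟨hqp, hqn, by omega⟩)
        · rintro (hq | hq)
          · exact Or.inl (Or.inl hq)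
          · rcases Nat.mem_primeFactors.mp hq with ⟨hqp, hqd, -⟩
            rcases eq_or_ne q d with rfl | hne
            · exact Or.inl (Or.inr rfl)
            · exact Or.inr (Nat.mem_primeFactors.mpr ⟨hqp, (hs4 q hqp hne).mpr hqd, by omega⟩)
      · rw [dif_neg (by rintro ⟨-, hh⟩; exact hc hh)]
        have hinv' : ∀ j, 2 ≤ j → j < d + 1 → ¬ j ∣ n := by
          intro j hj2 hjd hjdvd
          rcases Nat.lt_succ_iff_lt_or_eq.mp hjd with hlt | rfl
          · exact hinv j hj2 hlt hjdvd
          · exact hc (Nat.mod_eq_zero_of_dvd hjdvd)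
        have hdle : d ≤ n := le_trans (Nat.le_mul_of_pos_left d (by omega : 0 < d)) hdd
        exact ih n (d + 1) fs (by omega) (by omega) hn hinv' q
    · rw [dif_neg hdd]
      by_cases h1 : 1 < n
      · rw [if_pos h1]
        have hnp : n.Prime := by
          rw [Nat.prime_def_le_sqrt]
          refine ⟨by omega, fun m hm2 hms => ?_⟩
          have hmm : m * m ≤ n := Nat.le_sqrt.mp hms
          have hmd : m < d := by
            by_contra hh
            have : d * d ≤ m * m := Nat.mul_le_mul (by omega) (by omega)
            omega
          exact hinv m hm2 hmd
        simp [hnp.primeFactors]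
      · rw [if_neg h1]
        have hone : n = 1 := by omega
        simp [hone]

theorem pvPfGo_mem (n : Nat) (hn : 0 < n) (q : Nat) :
    q ∈ pvPfGo n 2 [] ↔ q ∈ n.primeFactors := by
  have := pvPfGo_mem_aux (n * (n + 2) + (n + 1)) n 2 []
    (by omega) (by omega) hn (fun j h1 h2 => (by omega : False).elim) q
  simpa using this

theorem pvPrimeFactors_mem (x q : Int) :
    q ∈ pvPrimeFactors x ↔ 0 ≤ q ∧ q.natAbs ∈ x.natAbs.primeFactors := by
  rcases Nat.eq_zero_or_pos x.natAbs with h0 | hp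
  · have hz : pvPfGo 0 2 [] = [] := by rw [pvPfGo]; norm_num
    simp [pvPrimeFactors, h0, hz]
  · rw [show pvPrimeFactors x
        = List.map (fun m : Nat => (m : Int)) (pvPfGo x.natAbs 2 []) from rfl,
      List.mem_map]
    constructor
    · intro hq
      obtain ⟨m, hm, hmq⟩ := hq
      subst hmq
      have hmem := (pvPfGo_mem _ hp m).mp hm
      exact ⟨Int.natCast_nonneg m, by simpa using hmem⟩
    · rintro ⟨hq0, hq⟩
      exact ⟨q.natAbs, (pvPfGo_mem _ hp q.natAbs).mpr hq, Int.natAbs_of_nonneg hq0⟩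

-- A's factors: distinct elements, and exactly the (casts of the) prime factors of |x|
theorem pvFactors_nodup (x : Int) : (pvFactors x).Nodup := PySem.Set.nodup_ofList _

theorem pvFactors_mem (x q : Int) :
    q ∈ pvFactors x ↔ 0 ≤ q ∧ q.natAbs ∈ x.natAbs.primeFactors := by
  unfold pvFactors
  rw [PySem.Set.mem_ofList]
  rw [pvFacLoop_mem (2 * x.natAbs) x 2 [] (by omega)
    (fun j h1 h2 => (by omega : False).elim) (by omega) q]
  simp

-- B's collected prime set: distinct, and exactly the primes occurring in the list
theorem pvPrimesAux (lst : List Int) : ∀ s : List Int, s.Nodup →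
    (lst.foldl (fun s x => PySem.Set.update s (pvPrimeFactors x)) s).Nodup ∧
    ∀ q, q ∈ lst.foldl (fun s x => PySem.Set.update s (pvPrimeFactors x)) s ↔
      q ∈ s ∨ ∃ x ∈ lst, q ∈ pvPrimeFactors x := by
  induction lst with
  | nil => intro s hs; exact ⟨hs, fun q => by simp⟩
  | cons x t iht =>
    intro s hs
    have h1 := iht (PySem.Set.update s (pvPrimeFactors x)) (PySem.Set.nodup_update s _ hs)
    refine ⟨h1.1, fun q => ?_⟩
    rw [List.foldl_cons, h1.2 q, PySem.Set.mem_update]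
    simp only [List.mem_cons]
    constructor
    · rintro ((hq | hq) | ⟨y, hy, hqy⟩)
      · exact Or.inl hq
      · exact Or.inr ⟨x, Or.inl rfl, hq⟩
      · exact Or.inr ⟨y, Or.inr hy, hqy⟩
    · rintro (hq | ⟨y, (rfl | hy), hqy⟩)
      · exact Or.inl (Or.inl hq)
      · exact Or.inl (Or.inr hqy)
      · exact Or.inr ⟨y, hy, hqy⟩

-- one element's inner dict loop adds i to the slot of each of its (distinct) factors
theorem pvInner (i : Int) (facs : List Int) (p : Int) : ∀ (d : PySem.Dict Int Int),
    facs.Nodup →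
    (facs.foldl (fun d fac => d.modify fac 0 (· + i)) d).getD p 0
      = d.getD p 0 + (if p ∈ facs then i else 0) := by
  induction facs with
  | nil => intro d _; simp
  | cons f t iht =>
    intro d hnd
    rw [List.foldl_cons, iht _ (List.Nodup.of_cons hnd), PySem.Dict.getD_modify]
    rcases eq_or_ne p f with rfl | hne
    · have hpt : p ∉ t := (List.nodup_cons.mp hnd).1
      simp [hpt]
    · simp [hne, List.mem_cons]

-- the accumulated dict value at p is the sum of the elements having p among their factors
theorem pvDict_getD (lst : List Int) (p : Int) : ∀ d : PySem.Dict Int Int,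
    (lst.foldl (fun d i => (pvFactors i).foldl (fun d fac => d.modify fac 0 (· + i)) d) d).getD p 0
      = d.getD p 0 +
        (lst.filter (fun i => decide (0 ≤ p ∧ p.natAbs ∈ i.natAbs.primeFactors))).sum := by
  induction lst with
  | nil => intro d; simp
  | cons i t iht =>
    intro d
    rw [List.foldl_cons, iht, pvInner i (pvFactors i) p d (pvFactors_nodup i),
      List.filter_cons]
    by_cases hp : 0 ≤ p ∧ p.natAbs ∈ i.natAbs.primeFactors
    · have hmem : p ∈ pvFactors i := (pvFactors_mem i p).mpr hp
      rw [if_pos hmem]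
      rw [if_pos (decide_eq_true hp), List.sum_cons]
      omega
    · have hmem : p ∉ pvFactors i := fun hh => hp ((pvFactors_mem i p).mp hh)
      rw [if_neg hmem]
      have hdec : ¬(decide (0 ≤ p ∧ p.natAbs ∈ i.natAbs.primeFactors) = true) := by
        simp only [decide_eq_true_eq]; exact hp
      rw [if_neg hdec]
      omega

-- the accumulated dict keys: distinct, and exactly the primes occurring in the list
theorem pvDict_keys (lst : List Int) : ∀ d : PySem.Dict Int Int, d.keys.Nodup →
    (lst.foldl (fun d i => (pvFactors i).foldl (fun d fac => d.modify fac 0 (· + i)) d) d).keys.Nodup ∧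
    ∀ p, p ∈ (lst.foldl (fun d i => (pvFactors i).foldl (fun d fac => d.modify fac 0 (· + i)) d) d).keys ↔
      p ∈ d.keys ∨ ∃ i ∈ lst, 0 ≤ p ∧ p.natAbs ∈ i.natAbs.primeFactors := by
  induction lst with
  | nil => intro d hd; exact ⟨hd, fun p => by simp⟩
  | cons i t iht =>
    intro d hd
    have hkeys : ((pvFactors i).foldl (fun d fac => d.modify fac 0 (· + i)) d).keys
        = PySem.Set.update d.keys (pvFactors i) :=
      PySem.Dict.keys_foldl_modify (pvFactors i) 0 (fun _ _ => (· + i)) d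
    have h1 := iht ((pvFactors i).foldl (fun d fac => d.modify fac 0 (· + i)) d)
      (by rw [hkeys]; exact PySem.Set.nodup_update _ _ hd)
    refine ⟨by rw [List.foldl_cons]; exact h1.1, fun p => ?_⟩
    rw [List.foldl_cons, h1.2 p, hkeys, PySem.Set.mem_update, pvFactors_mem]
    simp only [List.mem_cons]
    constructor
    · rintro ((hq | hq) | ⟨y, hy, hqy⟩)
      · exact Or.inl hq
      · exact Or.inr ⟨i, Or.inl rfl, hq⟩
      · exact Or.inr ⟨y, Or.inr hy, hqy⟩
    · rintro (hq | ⟨y, (rfl | hy), hqy⟩)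
      · exact Or.inl (Or.inl hq)
      · exact Or.inl (Or.inr hqy)
      · exact Or.inr ⟨y, hy, hqy⟩

-- for a nonnegative prime p, "p among the factors of i" sums to the same as "p divides i"
-- (the only disagreeing elements are i = 0, which contribute 0)
theorem pvSum_eq (p : Int) (hp0 : 0 ≤ p) (hpr : p.natAbs.Prime) (lst : List Int) :
    (lst.filter (fun i => decide (0 ≤ p ∧ p.natAbs ∈ i.natAbs.primeFactors))).sum
      = (lst.filter (fun x => PySem.Int.mod x p == 0)).sum := by
  induction lst with
  | nil => rfl
  | cons i t iht =>
    rw [List.filter_cons, List.filter_cons]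
    have hdvd : (PySem.Int.mod i p == 0) = true ↔ p ∣ i := by
      simp [PySem.Int.mod_eq_zero_iff_dvd]
    by_cases hc : 0 ≤ p ∧ p.natAbs ∈ i.natAbs.primeFactors
    · have hdi : p ∣ i := by
        rcases Nat.mem_primeFactors.mp hc.2 with ⟨-, hd, -⟩
        have hh := (pvCastDvd p.natAbs i).mpr hd
        rwa [Int.natAbs_of_nonneg hp0] at hh
      rw [if_pos (decide_eq_true hc), if_pos (hdvd.mpr hdi)]
      rw [List.sum_cons, List.sum_cons, iht]
    · rw [if_neg (by simp only [decide_eq_true_eq]; exact hc)]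
      by_cases hdi : p ∣ i
      · have hi0 : i = 0 := by
          by_contra hne
          apply hc
          refine ⟨hp0, Nat.mem_primeFactors.mpr ⟨hpr, ?_, by omega⟩⟩
          exact (pvCastDvd p.natAbs i).mp (by rwa [Int.natAbs_of_nonneg hp0])
        rw [if_pos (hdvd.mpr hdi), List.sum_cons, hi0, iht]
        omega
      · rw [if_neg (fun hh => hdi (hdvd.mp hh))]
        exact iht

-- Python's lexicographic order on the [prime, sum] pairs is decided by the prime
theorem pvPairLt (p q a b : Int) (h : p < q) : ([p, a] : List Int) < [q, b] :=
  List.Lex.rel h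

-- the DecidableLT instance in the ports' `sorted` call and the one in the library's
-- order lemmas decide the same relation, so the sorts coincide
theorem pvSorted_bridge (xs : List (List Int)) :
    PySem.List.sorted xs (fun l => l) false
      = @PySem.List.sorted (List Int) (List Int) List.instLT
          (@LinearOrder.toDecidableLT _ List.instLinearOrder) xs (fun l => l) false := by
  rw [PySem.List.sorted_eq_foldl_insertBy]
  rw [@PySem.List.sorted_eq_foldl_insertBy (List Int) (List Int) List.instLT
    (@LinearOrder.toDecidableLT _ List.instLinearOrder)]
  congr 1
  funext acc x
  congr 1
  funext a b
  exact congrArg (fun ins => @decide ((a : List Int) < b) ins) (Subsingleton.elim _ _)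

theorem pvSorted_eq_listInt (xs ys : List (List Int)) (hp : ys.Perm xs)
    (ho : ys.Pairwise (· < ·)) :
    PySem.List.sorted xs (fun l => l) false = ys := by
  rw [pvSorted_bridge]
  exact PySem.List.sorted_eq_of_perm_of_pairwise_lt xs ys (fun l => l) hp ho

-- the main equivalence
theorem pvMain (lst : List Int) : sum_for_list_best lst = sum_for_list_best_alt lst := by
  unfold sum_for_list_best sum_for_list_best_alt
  obtain ⟨hKnd, hKmem⟩ := pvDict_keys lst PySem.Dict.empty (by
    rw [PySem.Dict.keys_empty]; exact List.nodup_nil)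
  obtain ⟨hPnd, hPmem⟩ := pvPrimesAux lst PySem.Set.empty List.nodup_nil
  set D := lst.foldl (fun d i => (pvFactors i).foldl (fun d fac => d.modify fac 0 (· + i)) d)
    PySem.Dict.empty with hD
  set P := lst.foldl (fun s x => PySem.Set.update s (pvPrimeFactors x)) PySem.Set.empty with hP
  -- the value stored at each key is B's per-prime sum
  have hval : ∀ k, k ∈ D.keys →
      D.getD k 0 = (lst.filter (fun x => PySem.Int.mod x k == 0)).sum := by
    intro k hk
    rcases (hKmem k).mp hk with hk0 | ⟨i, hi, hk1, hk2⟩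
    · rw [PySem.Dict.keys_empty] at hk0; exact absurd hk0 (List.not_mem_nil)
    · rw [hD, pvDict_getD lst k PySem.Dict.empty, PySem.Dict.getD_empty]
      rw [pvSum_eq k hk1 (Nat.prime_of_mem_primeFactors hk2) lst]
      omega
  -- A's pre-sort list is the key list mapped through B's per-prime pair builder
  have hitems : D.items.map (fun kv => [kv.1, kv.2])
      = D.keys.map (fun k => [k, (lst.filter (fun x => PySem.Int.mod x k == 0)).sum]) := by
    rw [PySem.Dict.items_eq_map_keys D hKnd 0, List.map_map]
    exact List.map_congr_left (fun k hk => by simp [Function.comp, hval k hk])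
  -- the key list and B's prime set are permutations of each other
  have hPK : P.Perm D.keys := by
    rw [List.perm_ext_iff_of_nodup hPnd hKnd]
    intro q
    rw [hPmem q, hKmem q, PySem.Dict.keys_empty]
    simp [pvPrimeFactors_mem, PySem.Set.empty]
  -- B's sorted prime list is strictly increasing
  have hsp : (PySem.List.sorted P (fun p => p) false).Pairwise (· < ·) := by
    have hle := PySem.List.sorted_pairwise P (fun p => p)
    have hnd : (PySem.List.sorted P (fun p => p) false).Nodup :=
      (PySem.List.sorted_perm P (fun p => p) false).symm.nodup hPnd
    exact (hle.and hnd).imp (fun h => lt_of_le_of_ne h.1 h.2)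
  apply pvSorted_eq_listInt
  · rw [hitems]
    exact List.Perm.map _ ((PySem.List.sorted_perm P (fun p => p) false).trans hPK)
  · rw [List.pairwise_map]
    exact hsp.imp (fun h => pvPairLt _ _ _ _ h)

-- ===== VERDICT (by name: the statement is the Claim_ definition above) =====
theorem sum_for_list_best_spec : Claim_equal_sum_for_list_best := by
  intro lst _
  unfold Spec_sum_for_list_best
  exact pvMain lst
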